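-- pv_equiv track=rewrite | github.com/BrunelXian/Manufacturing-AI-Radar | scripts/tag_assigner.py | tag_scores
-- ===== SOURCE A (Python) =====
-- from typing import Any, Dict, List
--
-- def tag_scores(text: str, mapping: Dict[str, List[str]]) -> Dict[str, int]:
--     lowered = text.lower()
--     scores: Dict[str, int] = {}
--     for tag, terms in mapping.items():
--         hit_count = sum(1 for term in terms if term in lowered)
--         if hit_count:
--             scores[tag] = hit_count
--     return scores
-- ===== SOURCE B (Python) =====
-- def tag_scores(text, mapping):
--     lowered = text.lower()
--     n = len(lowered)
--     # index built over the TEXT: the set of all substrings of lowered whose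
--     # length equals some term's length; substring search becomes exact-match lookup
--     lengths = {len(t) for terms in mapping.values() for t in terms}
--     present = set()
--     for L in lengths:
--         for i in range(n - L + 1):
--             present.add(lowered[i:i + L])
--     scores = {}
--     for tag, terms in mapping.items():
--         c = sum(1 for t in terms if t in present)
--         if c:
--             scores[tag] = c
--     return scores
-- ===== Notes on version B (the rewrite author's own statement) =====
-- stated objective: faster
-- what changed: B inverts the search direction: it builds a hash-set index of all substrings of the lowered text whose lengths match the terms' distinct lengths (one pass over the text per distinct length), then tallies each tag by exact-match set lookups, replacing A's per-term substring scan of the text.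
import Mathlib
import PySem

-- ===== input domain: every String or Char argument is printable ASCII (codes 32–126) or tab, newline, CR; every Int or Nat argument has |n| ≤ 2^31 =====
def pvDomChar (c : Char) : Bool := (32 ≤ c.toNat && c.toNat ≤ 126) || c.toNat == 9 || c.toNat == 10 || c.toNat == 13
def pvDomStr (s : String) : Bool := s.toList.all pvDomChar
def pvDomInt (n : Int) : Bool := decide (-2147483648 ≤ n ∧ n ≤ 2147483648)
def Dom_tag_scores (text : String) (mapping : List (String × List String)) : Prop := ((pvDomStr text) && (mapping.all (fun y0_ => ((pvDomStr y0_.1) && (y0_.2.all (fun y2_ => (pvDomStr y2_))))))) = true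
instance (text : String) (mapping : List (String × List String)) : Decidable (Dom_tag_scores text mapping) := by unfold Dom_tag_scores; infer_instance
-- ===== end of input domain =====

-- B inverts the search direction: it indexes the TEXT (the set of all substrings of the
-- lowered text whose length equals some term's length) and tallies each tag by exact-match
-- set lookups, instead of A's per-term substring scan of the text; proved to return A's dict.

-- ===== PORT A =====
def tag_scores (text : String) (mapping : List (String × List String)) : List (String × Int) :=
  let lowered := PySem.Str.lower text
  (mapping.foldl (fun (scores : PySem.Dict String Int) p =>
      let hit_count : Int :=
        p.2.foldl (fun acc term => acc + if PySem.Str.isIn term lowered then 1 else 0) 0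
      if hit_count ≠ 0 then scores.insert p.1 hit_count else scores)
    PySem.Dict.empty).items

-- ===== PORT B =====
-- the inner 'for i in range(n - L + 1): present.add(lowered[i:i+L])' loop of Source B
def pvAddSlices (lowered : String) (pres : PySem.Set String) (L : Int) : PySem.Set String :=
  (PySem.List.pyRange 0 (PySem.Str.len lowered - L + 1)).foldl
    (fun pres i => PySem.Set.add pres (PySem.Str.slice lowered (some i) (some (i + L)))) pres

def tag_scores_alt (text : String) (mapping : List (String × List String)) : List (String × Int) :=
  let lowered := PySem.Str.lower text
  let lengths : PySem.Set Int :=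
    PySem.Set.ofList ((mapping.flatMap (fun p => p.2)).map (fun t => PySem.Str.len t))
  let present : PySem.Set String := lengths.foldl (pvAddSlices lowered) PySem.Set.empty
  (mapping.foldl (fun (scores : PySem.Dict String Int) p =>
      let c : Int :=
        p.2.foldl (fun acc t => acc + if PySem.Set.contains present t then 1 else 0) 0
      if c ≠ 0 then scores.insert p.1 c else scores)
    PySem.Dict.empty).items

-- ===== PRECONDITION & SPEC =====
def Spec_tag_scores (text : String) (mapping : List (String × List String)) (out : List (String × Int)) : Prop := out = tag_scores_alt text mapping
instance (text : String) (mapping : List (String × List String)) (out : List (String × Int)) : Decidable (Spec_tag_scores text mapping out) := by unfold Spec_tag_scores; infer_instance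

-- ===== CLAIM (what is proved, stated in full; the proofs are below) =====
def Claim_equal_tag_scores : Prop := ∀ (text : String) (mapping : List (String × List String)), Dom_tag_scores text mapping → Spec_tag_scores text mapping (tag_scores text mapping)

-- ===== LEMMAS AND PROOFS =====

-- membership in a set built by repeatedly adding f x over a list
theorem pvMemFoldAdd {α β : Type} [BEq β] [LawfulBEq β] (xs : List α) (f : α → β)
    (init : PySem.Set β) (t : β) :
    t ∈ xs.foldl (fun s x => PySem.Set.add s (f x)) init ↔ t ∈ init ∨ ∃ x ∈ xs, f x = t := by
  induction xs generalizing init with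
  | nil => simp
  | cons x xs ih =>
    simp only [List.foldl_cons, ih, PySem.Set.mem_add, List.mem_cons]
    constructor
    · rintro ((h | h) | ⟨y, hy, rfl⟩)
      · exact Or.inl h
      · exact Or.inr ⟨x, Or.inl rfl, h.symm⟩
      · exact Or.inr ⟨y, Or.inr hy, rfl⟩
    · rintro (h | ⟨y, (rfl | hy), rfl⟩)
      · exact Or.inl (Or.inl h)
      · exact Or.inl (Or.inr rfl)
      · exact Or.inr ⟨y, hy, rfl⟩

-- membership in B's 'present' set: some length L of the list produced a matching slice
theorem pvMemPresent (lowered : String) (Ls : List Int) (init : PySem.Set String) (t : String) :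
    t ∈ Ls.foldl (pvAddSlices lowered) init ↔
      t ∈ init ∨ ∃ L ∈ Ls, ∃ i : Int, 0 ≤ i ∧ i < PySem.Str.len lowered - L + 1 ∧
        PySem.Str.slice lowered (some i) (some (i + L)) = t := by
  induction Ls generalizing init with
  | nil => simp
  | cons L Ls ih =>
    simp only [List.foldl_cons, ih, List.mem_cons]
    have hstep : t ∈ pvAddSlices lowered init L ↔ t ∈ init ∨ ∃ i : Int,
        0 ≤ i ∧ i < PySem.Str.len lowered - L + 1 ∧
        PySem.Str.slice lowered (some i) (some (i + L)) = t := by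
      unfold pvAddSlices
      rw [pvMemFoldAdd]
      constructor
      · rintro (h | ⟨i, hi, rfl⟩)
        · exact Or.inl h
        · rcases PySem.List.mem_pyRange_one.mp hi with ⟨h0, h1⟩
          exact Or.inr ⟨i, h0, h1, rfl⟩
      · rintro (h | ⟨i, h0, h1, rfl⟩)
        · exact Or.inl h
        · exact Or.inr ⟨i, PySem.List.mem_pyRange_one.mpr ⟨h0, h1⟩, rfl⟩
    rw [hstep]
    constructor
    · rintro ((h | ⟨i, h0, h1, he⟩) | ⟨L', hL', rest⟩)
      · exact Or.inl h
      · exact Or.inr ⟨L, Or.inl rfl, i, h0, h1, he⟩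
      · exact Or.inr ⟨L', Or.inr hL', rest⟩
    · rintro (h | ⟨L', (rfl | hL'), rest⟩)
      · exact Or.inl (Or.inl h)
      · exact Or.inl (Or.inr rest)
      · exact Or.inr ⟨L', hL', rest⟩

-- a nonnegative-bounds slice of a string is a substring of it
theorem pvSliceIsIn (lowered : String) (i L : Int) (h0 : 0 ≤ i) (hL : 0 ≤ L) :
    PySem.Str.isIn (PySem.Str.slice lowered (some i) (some (i + L))) lowered = true := by
  rw [PySem.Str.isIn_iff_infix, PySem.Str.toList_slice, PySem.Chars.slice_eq_listSlice,
    PySem.List.slice_toNat _ h0 (by omega)]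
  exact ((List.take_prefix _ _).isInfix).trans ((List.drop_suffix _ _).isInfix)

-- conversely, a term occurring in the text is the slice at the position where it occurs
theorem pvIsInSlice (lowered t : String) (h : PySem.Str.isIn t lowered = true) :
    ∃ i : Int, 0 ≤ i ∧ i < PySem.Str.len lowered - PySem.Str.len t + 1 ∧
      PySem.Str.slice lowered (some i) (some (i + PySem.Str.len t)) = t := by
  rcases (PySem.Str.isIn_iff_infix t lowered).mp h with ⟨s₁, s₂, hsplit⟩
  refine ⟨(s₁.length : Int), by positivity, ?_, ?_⟩
  · rw [PySem.Str.len_eq, PySem.Str.len_eq, ← hsplit]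
    simp only [List.length_append]
    push_cast
    omega
  · apply String.toList_inj.mp
    rw [PySem.Str.toList_slice, PySem.Chars.slice_eq_listSlice, PySem.Str.len_eq,
      PySem.List.slice_toNat _ (by positivity) (by positivity)]
    have h1 : ((s₁.length : Int)).toNat = s₁.length := Int.toNat_natCast _
    have h2 : ((s₁.length : Int) + (t.toList.length : Int)).toNat = s₁.length + t.toList.length := by
      omega
    rw [h1, h2, ← hsplit, List.append_assoc, List.drop_left, Nat.add_sub_cancel_left,
      List.take_left]

-- for a term of the mapping, membership in B's index IS A's substring test
theorem pvPresentContains (lowered : String) (mapping : List (String × List String))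
    (t : String) (ht : t ∈ mapping.flatMap (fun p => p.2)) :
    PySem.Set.contains
      ((PySem.Set.ofList ((mapping.flatMap (fun p => p.2)).map (fun u => PySem.Str.len u))).foldl
        (pvAddSlices lowered) PySem.Set.empty) t
      = PySem.Str.isIn t lowered := by
  have hlen : PySem.Str.len t ∈
      (PySem.Set.ofList ((mapping.flatMap (fun p => p.2)).map (fun u => PySem.Str.len u)) : List Int) := by
    rw [PySem.Set.mem_ofList]
    exact List.mem_map.mpr ⟨t, ht, rfl⟩
  by_cases hin : PySem.Str.isIn t lowered = true
  · rw [hin]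
    rcases pvIsInSlice lowered t hin with ⟨i, h0, h1, he⟩
    exact (PySem.Set.contains_iff _ t).mpr
      ((pvMemPresent lowered _ _ t).mpr (Or.inr ⟨PySem.Str.len t, hlen, i, h0, h1, he⟩))
  · rw [Bool.eq_false_iff.mpr hin, ← Bool.not_eq_true]
    intro hc
    rcases (pvMemPresent lowered _ _ t).mp ((PySem.Set.contains_iff _ t).mp hc) with
      h | ⟨L, hL, i, h0, h1, he⟩
    · simp [PySem.Set.empty] at h
    · have hLnn : 0 ≤ L := by
        rcases PySem.Set.mem_ofList _ _ |>.mp hL |> List.mem_map.mp with ⟨u, _, rfl⟩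
        rw [PySem.Str.len_eq]; positivity
      exact hin (he ▸ pvSliceIsIn lowered i L h0 hLnn)

-- ===== VERDICT (by name: the statement is the Claim_ definition above) =====
theorem tag_scores_spec : Claim_equal_tag_scores := by
  intro text mapping _
  unfold Spec_tag_scores
  simp only [tag_scores, tag_scores_alt]
  congr 1
  apply PySem.List.foldl_congr_mem
  intro scores p hp
  have hcount :
      p.2.foldl (fun acc term =>
        acc + if PySem.Str.isIn term (PySem.Str.lower text) then 1 else 0) (0 : Int)
      = p.2.foldl (fun acc t =>
        acc + if PySem.Set.contains
          ((PySem.Set.ofList ((mapping.flatMap (fun q => q.2)).map (fun u => PySem.Str.len u))).foldl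
            (pvAddSlices (PySem.Str.lower text)) PySem.Set.empty) t
        then 1 else 0) (0 : Int) := by
    apply PySem.List.foldl_congr_mem
    intro acc t ht
    rw [pvPresentContains (PySem.Str.lower text) mapping t (List.mem_flatMap.mpr ⟨p, hp, ht⟩)]
  rw [hcount]
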